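-- pv_equiv track=rewrite | github.com/captbighead/Advent-Of-Code-2019 | AoC 2019/solutions/day4.py | do_part_two_for
-- ===== SOURCE A (Python) =====
-- import collections
--
-- def do_part_two_for(irange):
-- 	valids = 0
-- 	for pot_pwd in irange:
-- 		pwd = str(pot_pwd)
--
-- 		asc = True
-- 		for i in range(len(pwd)-1):
-- 			asc = asc and int(pwd[i]) <= int(pwd[i+1])
--
-- 		freq = collections.defaultdict(lambda:0)
-- 		for char in pwd:
-- 			freq[char] += 1
-- 		dub = False
-- 		for char in freq.keys():
-- 			dub = dub or freq[char] == 2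
--
-- 		valids += 1 if asc and dub else 0
-- 	return valids
-- ===== SOURCE B (Python) =====
-- import collections
--
--
-- def do_part_two_for(irange):
--     valids = 0
--     for pot_pwd in irange:
--         pwd = str(pot_pwd)
--         digits = [int(c) for c in pwd]
--         if digits == sorted(digits) and 2 in collections.Counter(pwd).values():
--             valids += 1
--     return valids
-- ===== Notes on version B (the rewrite author's own statement) =====
-- stated objective: simpler
-- what changed: B tests ascendingness by comparing the digit list with its sorted copy (sort-and-compare) and tests the exact-pair condition as membership of 2 in Counter values, replacing A's index-driven adjacent-pair AND loop and its two explicit defaultdict/or accumulation loops.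
import Mathlib
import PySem

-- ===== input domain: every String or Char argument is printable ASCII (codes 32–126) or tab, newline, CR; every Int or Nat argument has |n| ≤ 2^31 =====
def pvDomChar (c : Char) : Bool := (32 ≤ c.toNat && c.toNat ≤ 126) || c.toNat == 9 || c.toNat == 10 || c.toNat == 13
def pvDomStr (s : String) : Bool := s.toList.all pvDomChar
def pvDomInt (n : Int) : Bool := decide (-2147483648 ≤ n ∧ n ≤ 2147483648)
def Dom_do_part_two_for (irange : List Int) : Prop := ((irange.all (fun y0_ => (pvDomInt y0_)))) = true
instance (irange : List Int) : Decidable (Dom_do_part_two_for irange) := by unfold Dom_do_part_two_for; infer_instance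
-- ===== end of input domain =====

-- B replaces A's adjacent-pair AND loop by sort-and-compare on the digit list and the
-- defaultdict/or loops by '2 in Counter(pwd).values()' — a simpler decomposition, not faster.


-- int(c) for a one-character string c; Python raises (→ none) only on non-digit chars,
-- which Pre_ excludes (negative numbers give a '-' character), so the getD 0 default is never reached on Pre_.
def pvIntOf1 (c : Char) : Int := (PySem.Int.ofChars? [c]).getD 0

-- ===== PORT A =====
def do_part_two_for (irange : List Int) : Int :=
  irange.foldl (fun valids pot_pwd =>
    let pwd := PySem.Int.toChars pot_pwd
    let asc := (PySem.List.pyRange 0 ((pwd.length : Int) - 1)).foldl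
      (fun asc i => asc && decide (pvIntOf1 (PySem.List.pyGetD pwd i ' ')
                                   ≤ pvIntOf1 (PySem.List.pyGetD pwd (i + 1) ' '))) true
    let freq := pwd.foldl (fun d c => d.modify c 0 (· + 1)) (PySem.Dict.empty : PySem.Dict Char Int)
    let dub := freq.keys.foldl (fun dub c => dub || decide (freq.getD c 0 = 2)) false
    valids + (if asc && dub then 1 else 0)) 0

-- ===== PORT B =====
def do_part_two_for_alt (irange : List Int) : Int :=
  irange.foldl (fun valids pot_pwd =>
    let pwd := PySem.Int.toChars pot_pwd
    let digits := pwd.map pvIntOf1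
    if digits = PySem.List.sorted digits (fun x => x) ∧
       (PySem.Dict.counter pwd).values.contains 2 then valids + 1 else valids) 0

-- ===== PRECONDITION & SPEC =====
-- Pre_ excludes negative elements: on those both Pythons raise ValueError (int('-')).
def Pre_do_part_two_for (irange : List Int) : Prop := ∀ x ∈ irange, 0 ≤ x
instance (irange : List Int) : Decidable (Pre_do_part_two_for irange) := by unfold Pre_do_part_two_for; infer_instance
def pvWitness_do_part_two_for : List Int := [111122, 123444, 9, 0]

def Spec_do_part_two_for (irange : List Int) (out : Int) : Prop := out = do_part_two_for_alt irange
instance (irange : List Int) (out : Int) : Decidable (Spec_do_part_two_for irange out) := by unfold Spec_do_part_two_for; infer_instance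

-- ===== CLAIM (what is proved, stated in full; the proofs are below) =====
def Claim_equal_do_part_two_for : Prop := ∀ (irange : List Int), Dom_do_part_two_for irange → Pre_do_part_two_for irange → Spec_do_part_two_for irange (do_part_two_for irange)

-- ===== LEMMAS AND PROOFS =====

theorem pv_foldl_and {α : Type} (p : α → Bool) : ∀ (l : List α) (b : Bool),
    l.foldl (fun b x => b && p x) b = (b && l.all p) := by
  intro l
  induction l with
  | nil => simp
  | cons x t ih => intro b; simp [List.foldl_cons, ih, Bool.and_assoc]

theorem pv_foldl_or {α : Type} (p : α → Bool) : ∀ (l : List α) (b : Bool),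
    l.foldl (fun b x => b || p x) b = (b || l.any p) := by
  intro l
  induction l with
  | nil => simp
  | cons x t ih => intro b; simp [List.foldl_cons, ih, Bool.or_assoc]

-- the ascending test: A's adjacent-pair loop equals B's sort-and-compare
theorem pv_asc_eq (cs : List Char) :
    ((PySem.List.pyRange 0 ((cs.length : Int) - 1)).foldl
      (fun asc i => asc && decide (pvIntOf1 (PySem.List.pyGetD cs i ' ')
                                   ≤ pvIntOf1 (PySem.List.pyGetD cs (i + 1) ' '))) true)
    = decide (cs.map pvIntOf1 = PySem.List.sorted (cs.map pvIntOf1) (fun x => x)) := by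
  cases cs with
  | nil => decide
  | cons c t =>
    have hlen : ((c :: t).length : Int) - 1 = (t.length : Int) := by simp
    rw [hlen, PySem.List.pyRange_zero_natCast, List.foldl_map, pv_foldl_and, Bool.true_and,
      Bool.eq_iff_iff]
    simp only [List.all_eq_true, List.mem_range, decide_eq_true_eq]
    constructor
    · intro h
      have hp : List.Pairwise (fun a b : Int => a ≤ b) (List.map pvIntOf1 (c :: t)) := by
        rw [← List.isChain_iff_pairwise, List.isChain_iff_getElem]
        intro i hi
        have hi' : i < t.length := by simpa using hi
        have hthis := h i hi'
        rw [show ((i : Int) + 1) = ((i + 1 : Nat) : Int) by push_cast; ring,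
          PySem.List.pyGetD_natCast, PySem.List.pyGetD_natCast,
          List.getD_eq_getElem _ _ (by simp; omega), List.getD_eq_getElem _ _ (by simp; omega)]
          at hthis
        simpa only [List.getElem_map] using hthis
      exact (PySem.List.sorted_eq_self_of_pairwise _ _ hp).symm
    · intro h i hi'
      have hp := PySem.List.sorted_pairwise (List.map pvIntOf1 (c :: t)) (fun x => x)
      rw [← h, ← List.isChain_iff_pairwise, List.isChain_iff_getElem] at hp
      have hi : i + 1 < (List.map pvIntOf1 (c :: t)).length := by simp; omega
      have hthis := hp i hi
      simp only [List.getElem_map] at hthis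
      rw [show ((i : Int) + 1) = ((i + 1 : Nat) : Int) by push_cast; ring,
        PySem.List.pyGetD_natCast, PySem.List.pyGetD_natCast,
        List.getD_eq_getElem _ _ (by simp; omega), List.getD_eq_getElem _ _ (by simp; omega)]
      exact hthis

-- the exact-pair test: A's defaultdict + or-loop equals B's '2 in Counter(pwd).values()'
theorem pv_dub_eq (cs : List Char) :
    ((cs.foldl (fun d c => d.modify c 0 (· + 1)) (PySem.Dict.empty : PySem.Dict Char Int)).keys.foldl
      (fun dub c => dub || decide ((cs.foldl (fun d c => d.modify c 0 (· + 1)) (PySem.Dict.empty : PySem.Dict Char Int)).getD c 0 = 2)) false)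
    = (PySem.Dict.counter cs).values.contains 2 := by
  set freq := cs.foldl (fun d c => d.modify c 0 (· + 1)) (PySem.Dict.empty : PySem.Dict Char Int) with hfreq
  have hkeys : freq.keys = PySem.Set.ofList cs := by
    rw [hfreq, PySem.Dict.keys_foldl_modify]
    have he : (PySem.Dict.empty : PySem.Dict Char Int).keys = [] := by simp [pysem]
    rw [he, PySem.Set.update_nil_left]
  have hget : ∀ c, freq.getD c 0 = (cs.count c : Int) := by
    intro c
    rw [hfreq, PySem.Dict.getD_foldl_modify_add_one]
    simp [pysem]
  have hvals : (PySem.Dict.counter cs).values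
      = (PySem.Set.ofList cs).map (fun k => ((cs.count k : Nat) : Int)) := by
    rw [PySem.Dict.values_eq_map_keys _ (PySem.Dict.nodup_keys_counter cs) 0,
      PySem.Dict.keys_counter]
    exact List.map_congr_left (fun k _ => PySem.Dict.getD_counter cs k)
  rw [pv_foldl_or, Bool.false_or, hkeys, hvals, List.contains_eq_any_beq, List.any_map]
  congr 1
  funext k
  rw [Bool.eq_iff_iff]
  simp only [Function.comp_apply, decide_eq_true_eq, beq_iff_eq, hget]
  exact eq_comm

theorem pv_if_eq (v : Int) (P : Prop) [inst : Decidable P] (b : Bool) :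
    v + (if decide P && b then 1 else 0) = if P ∧ b = true then v + 1 else v := by
  by_cases h : P <;> cases b <;> simp [h]

-- per-element: the two loop bodies agree
theorem pv_body_eq (valids pot_pwd : Int) :
    (let pwd := PySem.Int.toChars pot_pwd
     let asc := (PySem.List.pyRange 0 ((pwd.length : Int) - 1)).foldl
       (fun asc i => asc && decide (pvIntOf1 (PySem.List.pyGetD pwd i ' ')
                                    ≤ pvIntOf1 (PySem.List.pyGetD pwd (i + 1) ' '))) true
     let freq := pwd.foldl (fun d c => d.modify c 0 (· + 1)) (PySem.Dict.empty : PySem.Dict Char Int)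
     let dub := freq.keys.foldl (fun dub c => dub || decide (freq.getD c 0 = 2)) false
     valids + (if asc && dub then 1 else 0))
    = (let pwd := PySem.Int.toChars pot_pwd
       let digits := pwd.map pvIntOf1
       if digits = PySem.List.sorted digits (fun x => x) ∧
          (PySem.Dict.counter pwd).values.contains 2 then valids + 1 else valids) := by
  simp only [pv_asc_eq, pv_dub_eq]
  exact pv_if_eq valids _ _

theorem pv_main (l : List Int) : do_part_two_for l = do_part_two_for_alt l := by
  unfold do_part_two_for do_part_two_for_alt
  congr 1
  funext v x
  exact pv_body_eq v x

-- ===== VERDICT (by name: the statement is the Claim_ definition above) =====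
theorem do_part_two_for_spec : Claim_equal_do_part_two_for := by
  intro irange _ _
  exact pv_main irange
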